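-- pv_equiv track=rewrite | github.com/hansenwebco/advent-of-code-2024 | code-day02-01-code.py | validate_reading
-- ===== SOURCE A (Python) =====
-- def validate_reading(readings):
--
--     # creates pairs of each item next to each other in the readings array
--     # The zip object is an iterator, meaning it can only be consumed once, so make it a list.. guess how I learned this....
--     pairs = list(zip(readings, readings[1:]))
--
--     if all(i > j and i - j <= 3 for i, j in pairs):  # check counting down
--         return True
--     elif all(i < j and j - i <= 3 for i, j in pairs):  # check counting up
--         return True
--     else:  # neither matches
--         return False
-- ===== SOURCE B (Python) =====
-- def validate_reading(readings):
--     direction = None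
--     for a, b in zip(readings, readings[1:]):
--         if a == b or abs(a - b) > 3:
--             return False
--         d = b > a
--         if direction is None:
--             direction = d
--         elif d != direction:
--             return False
--     return True
-- ===== Notes on version B (the rewrite author's own statement) =====
-- stated objective: simpler
-- what changed: Replaced A's two fixed-direction all()-passes over a materialized pair list with one early-exiting loop that infers the monotone direction from the first pair and checks each step once.
import Mathlib
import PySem

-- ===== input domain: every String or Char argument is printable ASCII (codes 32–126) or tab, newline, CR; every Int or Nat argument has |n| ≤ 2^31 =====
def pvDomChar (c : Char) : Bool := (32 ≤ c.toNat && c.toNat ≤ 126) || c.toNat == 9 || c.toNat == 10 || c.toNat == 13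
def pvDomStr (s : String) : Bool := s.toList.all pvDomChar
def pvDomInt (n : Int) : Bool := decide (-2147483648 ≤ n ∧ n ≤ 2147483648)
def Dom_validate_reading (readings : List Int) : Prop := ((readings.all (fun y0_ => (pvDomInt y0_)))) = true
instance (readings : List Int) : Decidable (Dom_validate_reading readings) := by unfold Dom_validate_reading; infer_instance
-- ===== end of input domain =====

-- B replaces A's two fixed-direction all()-passes over the pair list with one early-exiting
-- loop that infers the direction from the first pair (objective: simpler, one pass).

-- ===== PORT A =====
def validate_reading (readings : List Int) : Bool :=
  let pairs := readings.zip (PySem.List.slice readings (some 1) none)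
  if pairs.all (fun p => decide (p.2 < p.1) && decide (p.1 - p.2 ≤ 3)) then
    true
  else if pairs.all (fun p => decide (p.1 < p.2) && decide (p.2 - p.1 ≤ 3)) then
    true
  else
    false

-- ===== PORT B =====
-- the for-loop of Source B: state = current direction (none until first pair), previous element
def vrGo (dir : Option Bool) (a : Int) (rest : List Int) : Bool :=
  match rest with
  | [] => true
  | b :: rest' =>
    if a = b ∨ 3 < |a - b| then false
    else
      let d : Bool := decide (a < b)
      match dir with
      | none => vrGo (some d) b rest'
      | some d0 => if d ≠ d0 then false else vrGo (some d) b rest'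

def validate_reading_alt (readings : List Int) : Bool :=
  match readings with
  | [] => true
  | a :: rest => vrGo none a rest

-- ===== PRECONDITION & SPEC =====
def Spec_validate_reading (readings : List Int) (out : Bool) : Prop := out = validate_reading_alt readings
instance (readings : List Int) (out : Bool) : Decidable (Spec_validate_reading readings out) := by unfold Spec_validate_reading; infer_instance

-- ===== CLAIM (what is proved, stated in full; the proofs are below) =====
def Claim_equal_validate_reading : Prop := ∀ (readings : List Int), Dom_validate_reading readings → Spec_validate_reading readings (validate_reading readings)

-- ===== LEMMAS AND PROOFS =====

-- A's down-pass over the pairs of a::l, written as a head-recursive predicate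
def allDown (a : Int) (l : List Int) : Bool :=
  match l with
  | [] => true
  | b :: l' => (decide (b < a) && decide (a - b ≤ 3)) && allDown b l'

def allUp (a : Int) (l : List Int) : Bool :=
  match l with
  | [] => true
  | b :: l' => (decide (a < b) && decide (b - a ≤ 3)) && allUp b l'

theorem zip_all_down (a : Int) (l : List Int) :
    ((a :: l).zip l).all (fun p => decide (p.2 < p.1) && decide (p.1 - p.2 ≤ 3)) = allDown a l := by
  induction l generalizing a with
  | nil => rfl
  | cons b l' ih => simp only [List.zip_cons_cons, List.all_cons, ih b, allDown]

theorem zip_all_up (a : Int) (l : List Int) :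
    ((a :: l).zip l).all (fun p => decide (p.1 < p.2) && decide (p.2 - p.1 ≤ 3)) = allUp a l := by
  induction l generalizing a with
  | nil => rfl
  | cons b l' ih => simp only [List.zip_cons_cons, List.all_cons, ih b, allUp]

theorem vrGo_some_false (a : Int) (l : List Int) : vrGo (some false) a l = allDown a l := by
  induction l generalizing a with
  | nil => rfl
  | cons b l' ih =>
    simp only [vrGo, allDown]
    by_cases h1 : a = b ∨ 3 < |a - b|
    · rw [if_pos h1]
      rcases h1 with h | h
      · subst h; simp
      · rcases lt_trichotomy a b with hlt | heq | hgt
        · have hz : ¬ (b < a) := by omega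
          simp [hz]
        · exfalso; rw [heq] at h; simp at h
        · have hz : ¬ (a - b ≤ 3) := by rw [abs_of_pos (by omega)] at h; omega
          simp [hz]
    · rw [if_neg h1]
      have hne : a ≠ b := fun h => h1 (Or.inl h)
      have habs : |a - b| ≤ 3 := le_of_not_gt (fun h => h1 (Or.inr h))
      by_cases hlt : a < b
      · have hz : ¬ (b < a) := by omega
        simp [hlt, hz]
      · have hba : b < a := by omega
        have hle : a - b ≤ 3 := by rw [abs_of_pos (by omega)] at habs; omega
        simp [hlt, hba, hle, ih]

theorem vrGo_some_true (a : Int) (l : List Int) : vrGo (some true) a l = allUp a l := by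
  induction l generalizing a with
  | nil => rfl
  | cons b l' ih =>
    simp only [vrGo, allUp]
    by_cases h1 : a = b ∨ 3 < |a - b|
    · rw [if_pos h1]
      rcases h1 with h | h
      · subst h; simp
      · rcases lt_trichotomy a b with hlt | heq | hgt
        · have hz : ¬ (b - a ≤ 3) := by rw [abs_of_neg (by omega)] at h; omega
          simp [hz]
        · exfalso; rw [heq] at h; simp at h
        · have hz : ¬ (a < b) := by omega
          simp [hz]
    · rw [if_neg h1]
      have hne : a ≠ b := fun h => h1 (Or.inl h)
      have habs : |a - b| ≤ 3 := le_of_not_gt (fun h => h1 (Or.inr h))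
      by_cases hlt : a < b
      · have hle : b - a ≤ 3 := by rw [abs_of_neg (by omega)] at habs; omega
        simp [hlt, hle, ih]
      · have hba : b < a := by omega
        have hz : ¬ (a < b) := by omega
        simp [hz]

theorem vrGo_none (a : Int) (l : List Int) : vrGo none a l = (allDown a l || allUp a l) := by
  cases l with
  | nil => rfl
  | cons b l' =>
    simp only [vrGo, allDown, allUp]
    by_cases h1 : a = b ∨ 3 < |a - b|
    · rw [if_pos h1]
      rcases h1 with h | h
      · subst h; simp
      · rcases lt_trichotomy a b with hlt | heq | hgt
        · have hz1 : ¬ (b < a) := by omega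
          have hz2 : ¬ (b - a ≤ 3) := by rw [abs_of_neg (by omega)] at h; omega
          simp [hz1, hz2]
        · exfalso; rw [heq] at h; simp at h
        · have hz1 : ¬ (a < b) := by omega
          have hz2 : ¬ (a - b ≤ 3) := by rw [abs_of_pos (by omega)] at h; omega
          simp [hz1, hz2]
    · rw [if_neg h1]
      have hne : a ≠ b := fun h => h1 (Or.inl h)
      have habs : |a - b| ≤ 3 := le_of_not_gt (fun h => h1 (Or.inr h))
      by_cases hlt : a < b
      · have hz : ¬ (b < a) := by omega
        have hle : b - a ≤ 3 := by rw [abs_of_neg (by omega)] at habs; omega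
        simp [hlt, hz, hle, vrGo_some_true]
      · have hba : b < a := by omega
        have hle : a - b ≤ 3 := by rw [abs_of_pos (by omega)] at habs; omega
        simp [hlt, hba, hle, vrGo_some_false]

-- ===== VERDICT (by name: the statement is the Claim_ definition above) =====
theorem validate_reading_spec : Claim_equal_validate_reading := by
  intro readings _
  unfold Spec_validate_reading validate_reading validate_reading_alt
  cases readings with
  | nil => rfl
  | cons a rest =>
    rw [PySem.List.slice_from_one]
    simp only [List.tail_cons, zip_all_down, zip_all_up, vrGo_none]
    by_cases hd : allDown a rest = true <;> by_cases hu : allUp a rest = true <;> simp [hd, hu]
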